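-- pv_equiv track=rewrite | github.com/Caleb68864/CC_AI_Tools | src/logic_ai_tools/git/utils.py | parse_file_selection
-- ===== SOURCE A (Python) =====
-- from typing import List, Dict, Optional, Union
--
-- def parse_file_selection(selection: str, file_list: List[str]) -> List[str]:
--     """
--     Parse user selection of files and return the corresponding file paths.
--
--     Args:
--         selection: User input string (e.g., "1,3,5-7")
--         file_list: List of available files
--
--     Returns:
--         List of selected file paths
--     """
--     if not selection.strip():
--         return file_list  # Return all files if no selection provided
--
--     selected_indices = set()
--
--     # Split by comma
--     parts = selection.split(',')
--
--     for part in parts: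
--         part = part.strip()
--         if not part:
--             continue
--
--         # Check if it's a range (e.g., "2-4")
--         if '-' in part:
--             try:
--                 start, end = map(int, part.split('-'))
--                 # Convert to 0-based indices and ensure they're in bounds
--                 start = max(1, start) - 1
--                 end = min(len(file_list), end)
--                 selected_indices.update(range(start, end))
--             except ValueError:
--                 # If parsing fails, try to interpret as a single number
--                 try:
--                     idx = int(part) - 1  # Convert to 0-based index
--                     if 0 <= idx < len(file_list):
--                         selected_indices.add(idx)
--                 except ValueError:
--                     pass
--         else:
--             # Single number
--             try:
--                 idx = int(part) - 1  # Convert to 0-based index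
--                 if 0 <= idx < len(file_list):
--                     selected_indices.add(idx)
--             except ValueError:
--                 pass
--
--     # Convert indices to file paths
--     return [file_list[i] for i in sorted(selected_indices)]
-- ===== SOURCE B (Python) =====
-- def _intervals(selection, n):
--     """Parse the selection into a list of half-open 0-based index intervals."""
--     ivs = []
--     for part in selection.split(','):
--         part = part.strip()
--         if '-' in part:
--             pieces = part.split('-')
--             if len(pieces) == 2:
--                 try:
--                     s, e = int(pieces[0]), int(pieces[1])
--                     ivs.append((max(1, s) - 1, min(n, e)))
--                     continue
--                 except ValueError:
--                     pass
--         try: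
--             idx = int(part) - 1
--         except ValueError:
--             continue
--         if 0 <= idx < n:
--             ivs.append((idx, idx + 1))
--     return ivs
--
--
-- def parse_file_selection(selection, file_list):
--     if not selection.strip():
--         return file_list
--     ivs = _intervals(selection, len(file_list))
--     return [f for i, f in enumerate(file_list)
--             if any(lo <= i < hi for lo, hi in ivs)]
-- ===== Notes on version B (the rewrite author's own statement) =====
-- stated objective: alternative
-- what changed: Instead of materializing every selected index into a set and sorting it, B parses the selection once into a list of half-open intervals (never expanding ranges into indices) and emits the files in one in-order scan, keeping each file iff some interval covers its index; no set, no sort, no index expansion.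
import Mathlib
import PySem

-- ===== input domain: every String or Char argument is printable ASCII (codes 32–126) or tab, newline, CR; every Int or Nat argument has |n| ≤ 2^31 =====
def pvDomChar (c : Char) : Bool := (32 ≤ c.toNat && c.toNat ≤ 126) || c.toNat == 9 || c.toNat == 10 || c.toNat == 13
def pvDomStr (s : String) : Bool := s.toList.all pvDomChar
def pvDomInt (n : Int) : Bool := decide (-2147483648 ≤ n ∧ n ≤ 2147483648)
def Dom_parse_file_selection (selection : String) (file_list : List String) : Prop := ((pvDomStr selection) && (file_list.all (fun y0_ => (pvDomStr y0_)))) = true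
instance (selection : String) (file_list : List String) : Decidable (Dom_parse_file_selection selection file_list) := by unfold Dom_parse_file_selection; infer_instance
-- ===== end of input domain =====

-- B replaces A's set of materialized indices + final sorted() with a once-parsed list of
-- half-open intervals and one in-order scan keeping each file whose index some interval
-- covers (no set, no sort, no range expansion); return values proved equal, no mutation.

-- ===== PORT A =====
-- s.split(sep) for a nonempty literal sep (split? is none only for sep = "")
def pySplit (s sep : String) : List String := (PySem.Str.split? s sep).getD []

-- one loop iteration of A: strip the part, range branch (with single-number fallback on
-- ValueError) or single-number branch, updating the set of selected 0-based indices
def pfsStepA (n : Int) (s : PySem.Set Int) (part0 : String) : PySem.Set Int :=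
  let part := PySem.Str.strip part0
  if part = "" then s
  else if PySem.Str.isIn "-" part then
    match (pySplit part "-").map PySem.Int.ofStr? with
    | [some a, some b] => PySem.Set.update s (PySem.List.pyRange (max 1 a - 1) (min n b) 1)
    | _ =>
      match PySem.Int.ofStr? part with
      | some v => if 0 ≤ v - 1 ∧ v - 1 < n then PySem.Set.add s (v - 1) else s
      | none => s
  else
    match PySem.Int.ofStr? part with
    | some v => if 0 ≤ v - 1 ∧ v - 1 < n then PySem.Set.add s (v - 1) else s
    | none => s

def parse_file_selection (selection : String) (file_list : List String) : List String :=
  if PySem.Str.strip selection = "" then file_list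
  else
    let selected := (pySplit selection ",").foldl
      (pfsStepA (PySem.List.len file_list)) PySem.Set.empty
    -- every index in `selected` is in range by construction, so pyGetD _ _ "" is exactly file_list[i]
    (PySem.List.sorted selected (fun x => x) false).map
      (fun i => PySem.List.pyGetD file_list i "")

-- ===== PORT B =====
-- B's per-part parser (body of _intervals' loop): the half-open interval a stripped part
-- selects, or none — the '-' branch with the len==2 / int-parse fallbacks, then single number
def partInterval (part : String) (n : Int) : Option (Int × Int) :=
  let r : Option (Int × Int) :=
    if PySem.Str.isIn "-" part then
      match (pySplit part "-").map PySem.Int.ofStr? with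
      | [some s, some e] => some (max 1 s - 1, min n e)
      | _ => none
    else none
  match r with
  | some iv => some iv
  | none =>
    match PySem.Int.ofStr? part with
    | some v => if 0 ≤ v - 1 ∧ v - 1 < n then some (v - 1, v) else none
    | none => none

-- B's _intervals: one pass over the parts, appending each parsed interval
def pfsIntervals (parts : List String) (n : Int) : List (Int × Int) :=
  parts.foldl (fun ivs p =>
    match partInterval (PySem.Str.strip p) n with
    | some iv => ivs ++ [iv]
    | none => ivs) []

def parse_file_selection_alt (selection : String) (file_list : List String) : List String :=
  if PySem.Str.strip selection = "" then file_list
  else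
    let ivs := pfsIntervals (pySplit selection ",") (PySem.List.len file_list)
    ((PySem.List.enumerate file_list 0).filter
      (fun p => ivs.any (fun iv => decide (iv.1 ≤ p.1 ∧ p.1 < iv.2)))).map (fun p => p.2)

-- ===== PRECONDITION & SPEC =====
def Spec_parse_file_selection (selection : String) (file_list : List String) (out : List String) : Prop := out = parse_file_selection_alt selection file_list
instance (selection : String) (file_list : List String) (out : List String) : Decidable (Spec_parse_file_selection selection file_list out) := by unfold Spec_parse_file_selection; infer_instance

-- ===== CLAIM (what is proved, stated in full; the proofs are below) =====
def Claim_equal_parse_file_selection : Prop := ∀ (selection : String) (file_list : List String), Dom_parse_file_selection selection file_list → Spec_parse_file_selection selection file_list (parse_file_selection selection file_list)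

-- ===== LEMMAS AND PROOFS =====

-- the list of indices a part contributes (characterisation of A's step via B's parser)
def pfsIdxList (n : Int) (part : String) : List Int :=
  match partInterval part n with
  | some iv => PySem.List.pyRange iv.1 iv.2 1
  | none => []

theorem pfs_single_eq (n : Int) (s : PySem.Set Int) (O : Option Int) :
    (match O with
     | some v => if 0 ≤ v - 1 ∧ v - 1 < n then PySem.Set.add s (v - 1) else s
     | none => s)
    = PySem.Set.update s (match (match O with
        | some v => if 0 ≤ v - 1 ∧ v - 1 < n then some (v - 1, v) else none
        | none => (none : Option (Int × Int))) with
        | some iv => PySem.List.pyRange iv.1 iv.2 1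
        | none => []) := by
  cases O with
  | none => simp [PySem.Set.update_nil]
  | some v =>
    dsimp only
    by_cases hc : 0 ≤ v - 1 ∧ v - 1 < n
    · have hr : PySem.List.pyRange (v - 1) v 1 = [v - 1] := by
        have h := PySem.List.pyRange_one_singleton (v - 1)
        rw [show v - 1 + 1 = v from by ring] at h
        exact h
      rw [if_pos hc, if_pos hc]
      dsimp only
      rw [hr]
      simp [PySem.Set.update_cons, PySem.Set.update_nil]
    · rw [if_neg hc, if_neg hc]
      dsimp only
      simp [PySem.Set.update_nil]

theorem pfsStepA_eq_update (n : Int) (s : PySem.Set Int) (part0 : String) :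
    pfsStepA n s part0 = PySem.Set.update s (pfsIdxList n (PySem.Str.strip part0)) := by
  unfold pfsStepA pfsIdxList partInterval
  by_cases hp : PySem.Str.strip part0 = ""
  · rw [hp]
    have h1 : PySem.Chars.isIn ['-'] ([] : List Char) = false := by decide
    have h2 : PySem.Int.ofStr? "" = none := by decide
    simp [h1, h2, PySem.Set.update_nil]
  · rw [if_neg hp]
    generalize (pySplit (PySem.Str.strip part0) "-").map PySem.Int.ofStr? = M
    generalize PySem.Int.ofStr? (PySem.Str.strip part0) = O
    by_cases hin : PySem.Str.isIn "-" (PySem.Str.strip part0)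
    · rw [if_pos hin, if_pos hin]
      rcases M with _ | ⟨_ | a, _ | ⟨_ | b, _ | ⟨c, t⟩⟩⟩ <;>
        first
          | (exact pfs_single_eq n s O)
          | rfl
    · rw [if_neg hin, if_neg hin]
      exact pfs_single_eq n s O

theorem pfs_single_bounds (n : Int) (O : Option Int) (iv : Int × Int)
    (h : (match O with
          | some v => if 0 ≤ v - 1 ∧ v - 1 < n then some (v - 1, v) else none
          | none => (none : Option (Int × Int))) = some iv) : 0 ≤ iv.1 ∧ iv.2 ≤ n := by
  cases O with
  | none => simp at h
  | some v =>
    dsimp only at h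
    by_cases hc : 0 ≤ v - 1 ∧ v - 1 < n
    · rw [if_pos hc] at h; cases h; exact ⟨hc.1, by omega⟩
    · rw [if_neg hc] at h; simp at h

theorem partInterval_bounds (part : String) (n : Int) (iv : Int × Int)
    (h : partInterval part n = some iv) : 0 ≤ iv.1 ∧ iv.2 ≤ n := by
  unfold partInterval at h
  by_cases hin : PySem.Str.isIn "-" part
  · rw [if_pos hin] at h
    rcases hm : (pySplit part "-").map PySem.Int.ofStr? with _ | ⟨_ | a, _ | ⟨_ | b, _ | ⟨c, t⟩⟩⟩ <;>
        rw [hm] at h <;> dsimp only at h <;>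
      first
        | exact pfs_single_bounds n _ iv h
        | (cases h; constructor <;> simp)
  · rw [if_neg hin] at h
    dsimp only at h
    exact pfs_single_bounds n _ iv h

theorem mem_pfsIdxList (n : Int) (part : String) (x : Int) :
    x ∈ pfsIdxList n part ↔
      ∃ iv, partInterval part n = some iv ∧ iv.1 ≤ x ∧ x < iv.2 := by
  unfold pfsIdxList
  cases h : partInterval part n with
  | none => simp
  | some iv => simp [PySem.List.mem_pyRange_one]

theorem pfsIdxList_bounds (n : Int) (part : String) (x : Int)
    (hx : x ∈ pfsIdxList n part) : 0 ≤ x ∧ x < n := by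
  rw [mem_pfsIdxList] at hx
  obtain ⟨iv, hiv, h1, h2⟩ := hx
  have := partInterval_bounds part n iv hiv
  omega

-- A's set after the loop: its members are exactly the indices some part's interval covers
theorem mem_foldl_stepA (n : Int) (parts : List String) (s : PySem.Set Int) (x : Int) :
    x ∈ parts.foldl (pfsStepA n) s ↔
      x ∈ s ∨ ∃ p ∈ parts, x ∈ pfsIdxList n (PySem.Str.strip p) := by
  induction parts generalizing s with
  | nil => simp
  | cons p t ih =>
    rw [List.foldl_cons, pfsStepA_eq_update, ih, PySem.Set.mem_update]
    simp only [List.mem_cons]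
    constructor
    · rintro ((h | h) | ⟨q, hq, hx⟩)
      · exact Or.inl h
      · exact Or.inr ⟨p, Or.inl rfl, h⟩
      · exact Or.inr ⟨q, Or.inr hq, hx⟩
    · rintro (h | ⟨q, (rfl | hq), hx⟩)
      · exact Or.inl (Or.inl h)
      · exact Or.inl (Or.inr hx)
      · exact Or.inr ⟨q, hq, hx⟩

theorem nodup_foldl_stepA (n : Int) (parts : List String) (s : PySem.Set Int)
    (h : s.Nodup) : (parts.foldl (pfsStepA n) s).Nodup := by
  induction parts generalizing s with
  | nil => exact h
  | cons p t ih =>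
    rw [List.foldl_cons, pfsStepA_eq_update]
    exact ih _ (PySem.Set.nodup_update s _ h)

-- B's interval list collects exactly the per-part parses
theorem pfsIntervals_eq_filterMap (parts : List String) (n : Int) (acc : List (Int × Int)) :
    parts.foldl (fun ivs p =>
        match partInterval (PySem.Str.strip p) n with
        | some iv => ivs ++ [iv]
        | none => ivs) acc
      = acc ++ parts.filterMap (fun p => partInterval (PySem.Str.strip p) n) := by
  induction parts generalizing acc with
  | nil => simp
  | cons p t ih =>
    rw [List.foldl_cons, List.filterMap_cons]
    cases h : partInterval (PySem.Str.strip p) n with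
    | none => rw [ih]
    | some iv => rw [ih]; simp

theorem mem_intervals_iff (parts : List String) (n : Int) (x : Int) :
    (∃ iv ∈ pfsIntervals parts n, iv.1 ≤ x ∧ x < iv.2) ↔
      ∃ p ∈ parts, x ∈ pfsIdxList n (PySem.Str.strip p) := by
  unfold pfsIntervals
  rw [pfsIntervals_eq_filterMap parts n []]
  simp only [List.nil_append, List.mem_filterMap, mem_pfsIdxList]
  constructor
  · rintro ⟨iv, ⟨p, hp, hiv⟩, hx⟩
    exact ⟨p, hp, iv, hiv, hx⟩
  · rintro ⟨p, hp, iv, hiv, hx⟩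
    exact ⟨iv, ⟨p, hp, hiv⟩, hx⟩

-- final passes: A's sorted-set lookup list = B's coverage-filtered in-order scan
theorem pfsFinal (file_list : List String) (s : List Int) (ivs : List (Int × Int))
    (hnd : s.Nodup) (hb : ∀ x ∈ s, 0 ≤ x ∧ x < (file_list.length : Int))
    (hcov : ∀ x : Int, x ∈ s ↔ ∃ iv ∈ ivs, iv.1 ≤ x ∧ x < iv.2) :
    (PySem.List.sorted s (fun x => x) false).map (fun i => PySem.List.pyGetD file_list i "")
      = ((PySem.List.enumerate file_list 0).filter
          (fun p => ivs.any (fun iv => decide (iv.1 ≤ p.1 ∧ p.1 < iv.2)))).map (fun p => p.2) := by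
  have hA : PySem.List.sorted s (fun x => x) false
      = (PySem.List.pyRange 0 (file_list.length : Int) 1).filter (fun x => decide (x ∈ s)) := by
    refine PySem.List.sorted_eq_of_perm_of_pairwise_lt s _ _ ?_ ?_
    · rw [List.perm_ext_iff_of_nodup
        (List.Nodup.filter _ (PySem.List.nodup_pyRange_one 0 (file_list.length : Int))) hnd]
      intro a
      simp only [List.mem_filter, PySem.List.mem_pyRange_one, decide_eq_true_eq]
      constructor
      · exact fun h => h.2
      · exact fun h => ⟨(hb a h), h⟩
    · exact (PySem.List.pairwise_lt_pyRange_one 0 (file_list.length : Int)).filter _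
  rw [hA, PySem.List.enumerate_eq_map_pyRange file_list "", List.filter_map, List.map_map,
    PySem.List.len_eq]
  have hcong : ∀ j ∈ PySem.List.pyRange 0 (file_list.length : Int) 1,
      ((fun p => ivs.any (fun iv => decide (iv.1 ≤ p.1 ∧ p.1 < iv.2)))
          ∘ fun j => (j, PySem.List.pyGetD file_list j "")) j
        = decide (j ∈ s) := by
    intro j _
    show ivs.any (fun iv => decide (iv.1 ≤ j ∧ j < iv.2)) = decide (j ∈ s)
    rw [Bool.eq_iff_iff, List.any_eq_true, decide_eq_true_eq, hcov j]
    simp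
  rw [List.filter_congr hcong]
  rfl

-- ===== VERDICT (by name: the statement is the Claim_ definition above) =====
theorem parse_file_selection_spec : Claim_equal_parse_file_selection := by
  intro selection file_list _
  unfold Spec_parse_file_selection parse_file_selection parse_file_selection_alt
  by_cases hs : PySem.Str.strip selection = ""
  · simp [hs]
  · simp only [hs, ite_false]
    have hlen : (PySem.List.len file_list) = (file_list.length : Int) := PySem.List.len_eq _
    rw [hlen]
    set parts := pySplit selection "," with hparts
    refine pfsFinal file_list _ _ (nodup_foldl_stepA _ parts [] List.nodup_nil) ?_ ?_
    · intro x hx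
      rw [mem_foldl_stepA] at hx
      rcases hx with h | ⟨p, _, hp⟩
      · simp at h
      · exact pfsIdxList_bounds _ _ x hp
    · intro x
      rw [mem_foldl_stepA, mem_intervals_iff]
      simp
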